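-- pv_equiv track=rewrite | github.com/moghit-eou/Cloud_app | helper.py | annotate_files
-- ===== SOURCE A (Python) =====
-- def annotate_files(files):
--     """Detect file types and assign 'type' field for icon display"""
--     for f in files:
--         mime = f.get('mimeType', '')
--         name = f.get('name', '').lower()
--
--         if mime.startswith('image/'):
--             f['type'] = 'image'
--         elif mime.startswith('video/'):
--             f['type'] = 'video'
--         elif mime.startswith('audio/'):
--             f['type'] = 'audio'
--         elif 'pdf' in mime or name.endswith('.pdf'):
--             f['type'] = 'pdf'
--         elif 'sheet' in mime or 'excel' in mime or name.endswith(('.xls', '.xlsx')):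
--             f['type'] = 'excel'
--         elif 'word' in mime or 'document' in mime or name.endswith(('.doc', '.docx')):
--             f['type'] = 'doc'
--         elif 'presentation' in mime or 'powerpoint' in mime or name.endswith(('.ppt', '.pptx')):
--             f['type'] = 'ppt'
--         elif 'text' in mime or name.endswith('.txt'):
--             f['type'] = 'text'
--         elif name.endswith(('.zip', '.rar', '.7z', '.tar', '.gz')):
--             f['type'] = 'archive'
--         else:
--             f['type'] = 'other'
--     return files
-- ===== SOURCE B (Python) =====
-- LABELS = ['image', 'video', 'audio', 'pdf', 'excel', 'doc', 'ppt', 'text', 'archive']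
-- MIME_PREFIXES = [('image/', 0), ('video/', 1), ('audio/', 2)]
-- MIME_KEYWORDS = [('pdf', 3), ('sheet', 4), ('excel', 4), ('word', 5), ('document', 5),
--                  ('presentation', 6), ('powerpoint', 6), ('text', 7)]
-- EXT_RANK = {'pdf': 3, 'xls': 4, 'xlsx': 4, 'doc': 5, 'docx': 5, 'ppt': 6, 'pptx': 6,
--             'txt': 7, 'zip': 8, 'rar': 8, '7z': 8, 'tar': 8, 'gz': 8}
--
--
-- def annotate_files(files):
--     """Detect file types and assign 'type' field for icon display.
--
--     Each label has a priority rank; the mime string contributes the ranks of the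
--     prefixes / keywords it matches, the name's extension (text after the last dot)
--     contributes its rank from a lookup table, and the smallest collected rank wins.
--     """
--     for f in files:
--         mime = f.get('mimeType', '')
--         name = f.get('name', '').lower()
--         ranks = [9]
--         for prefix, rank in MIME_PREFIXES:
--             if mime.startswith(prefix):
--                 ranks.append(rank)
--         for kw, rank in MIME_KEYWORDS:
--             if kw in mime:
--                 ranks.append(rank)
--         if '.' in name:
--             ranks.append(EXT_RANK.get(name.rsplit('.', 1)[1], 9))
--         r = min(ranks)
--         f['type'] = LABELS[r] if r < 9 else 'other'
--     return files
-- ===== Notes on version B (the rewrite author's own statement) =====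
-- stated objective: alternative
-- what changed: Replaces the if/elif first-match cascade with a priority-rank scheme: mime prefixes/keywords and the name's extension (extracted once after the last dot and looked up in a rank table) each contribute numeric ranks, and the minimum rank selects the label, so scanning order no longer decides.
import Mathlib
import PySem

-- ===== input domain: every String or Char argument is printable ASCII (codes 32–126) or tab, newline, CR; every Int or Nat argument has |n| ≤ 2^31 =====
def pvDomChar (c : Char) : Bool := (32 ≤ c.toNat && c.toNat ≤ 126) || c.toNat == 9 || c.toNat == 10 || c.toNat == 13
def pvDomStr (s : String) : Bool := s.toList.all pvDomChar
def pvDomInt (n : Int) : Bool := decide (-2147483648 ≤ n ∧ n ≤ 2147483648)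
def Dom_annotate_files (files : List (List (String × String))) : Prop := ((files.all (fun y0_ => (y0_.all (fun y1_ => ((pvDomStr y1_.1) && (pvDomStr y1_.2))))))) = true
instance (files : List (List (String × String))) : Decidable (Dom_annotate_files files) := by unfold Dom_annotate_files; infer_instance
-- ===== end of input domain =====

-- B replaces A's if/elif cascade by a priority-rank scheme: mime prefixes/keywords and the
-- name's extension (after the last dot, via a lookup table) contribute numeric ranks and the
-- minimum rank selects the label. A mutates its dicts in place, so the equivalence proved
-- here is about the RETURN value.

-- dict primitives shared by both ports: first-match lookup with default, and
-- in-place assignment (overwrite the first matching key in place, else append)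
def pvDictGet (f : List (String × String)) (k dflt : String) : String :=
  match f.find? (fun p => p.1 == k) with
  | some p => p.2
  | none => dflt

def pvDictSet (f : List (String × String)) (k v : String) : List (String × String) :=
  match f with
  | [] => [(k, v)]
  | (k', v') :: rest => if k' == k then (k, v) :: rest else (k', v') :: pvDictSet rest k v

-- ===== PORT A =====
def annotate_files (files : List (List (String × String))) : List (List (String × String)) :=
  files.map (fun f =>
    let mime := pvDictGet f "mimeType" ""
    let name := PySem.Str.lower (pvDictGet f "name" "")
    let t :=
      if PySem.Str.startswith mime "image/" then "image"
      else if PySem.Str.startswith mime "video/" then "video"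
      else if PySem.Str.startswith mime "audio/" then "audio"
      else if PySem.Str.isIn "pdf" mime || PySem.Str.endswith name ".pdf" then "pdf"
      else if PySem.Str.isIn "sheet" mime || PySem.Str.isIn "excel" mime ||
              PySem.Str.endswith name ".xls" || PySem.Str.endswith name ".xlsx" then "excel"
      else if PySem.Str.isIn "word" mime || PySem.Str.isIn "document" mime ||
              PySem.Str.endswith name ".doc" || PySem.Str.endswith name ".docx" then "doc"
      else if PySem.Str.isIn "presentation" mime || PySem.Str.isIn "powerpoint" mime ||
              PySem.Str.endswith name ".ppt" || PySem.Str.endswith name ".pptx" then "ppt"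
      else if PySem.Str.isIn "text" mime || PySem.Str.endswith name ".txt" then "text"
      else if PySem.Str.endswith name ".zip" || PySem.Str.endswith name ".rar" ||
              PySem.Str.endswith name ".7z" || PySem.Str.endswith name ".tar" ||
              PySem.Str.endswith name ".gz" then "archive"
      else "other"
    pvDictSet f "type" t)

-- ===== PORT B =====
-- Source B's module-level rank tables
def pvLabels : List String := ["image", "video", "audio", "pdf", "excel", "doc", "ppt", "text", "archive"]
def pvMimePrefixes : List (String × Nat) := [("image/", 0), ("video/", 1), ("audio/", 2)]
def pvMimeKeywords : List (String × Nat) :=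
  [("pdf", 3), ("sheet", 4), ("excel", 4), ("word", 5), ("document", 5),
   ("presentation", 6), ("powerpoint", 6), ("text", 7)]
def pvExtRank : List (String × Nat) :=
  [("pdf", 3), ("xls", 4), ("xlsx", 4), ("doc", 5), ("docx", 5), ("ppt", 6), ("pptx", 6),
   ("txt", 7), ("zip", 8), ("rar", 8), ("7z", 8), ("tar", 8), ("gz", 8)]

-- hand port of EXT_RANK.get(e, 9) on the Nat-valued table (first-match assoc lookup with default)
def pvLookupRank (tbl : List (String × Nat)) (e : String) : Nat :=
  match tbl.find? (fun p => p.1 == e) with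
  | some p => p.2
  | none => 9

-- hand port of name.rsplit('.', 1)[1]: the text after the LAST '.'; exact whenever '.' ∈ name
-- (B only calls it under the guard '.' in name)
def pvAfterLastDot (s : String) : String :=
  String.ofList ((s.toList.reverse.takeWhile (fun c => c != '.')).reverse)

def annotate_files_alt (files : List (List (String × String))) : List (List (String × String)) :=
  files.map (fun f =>
    let mime := pvDictGet f "mimeType" ""
    let name := PySem.Str.lower (pvDictGet f "name" "")
    let ranks : List Nat :=
      [9]
      ++ pvMimePrefixes.filterMap (fun pr => if PySem.Str.startswith mime pr.1 then some pr.2 else none)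
      ++ pvMimeKeywords.filterMap (fun kr => if PySem.Str.isIn kr.1 mime then some kr.2 else none)
      ++ (if PySem.Str.isIn "." name then [pvLookupRank pvExtRank (pvAfterLastDot name)] else [])
    let r := (PySem.List.min? ranks (fun x => x)).getD 9   -- min(ranks); ranks is nonempty ([9] leads)
    pvDictSet f "type" (if r < 9 then pvLabels.getD r "other" else "other"))  -- LABELS[r]: r < 9 = len(LABELS), so getD is exact

-- ===== PRECONDITION & SPEC =====
def Spec_annotate_files (files : List (List (String × String))) (out : List (List (String × String))) : Prop := out = annotate_files_alt files
instance (files : List (List (String × String))) (out : List (List (String × String))) : Decidable (Spec_annotate_files files out) := by unfold Spec_annotate_files; infer_instance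

-- ===== CLAIM (what is proved, stated in full; the proofs are below) =====
def Claim_equal_annotate_files : Prop := ∀ (files : List (List (String × String))), Dom_annotate_files files → Spec_annotate_files files (annotate_files files)


-- ===== LEMMAS AND PROOFS =====

-- the extension rank of a name, as B computes it
def pvErOf (name : String) : Nat :=
  if PySem.Str.isIn "." name then pvLookupRank pvExtRank (pvAfterLastDot name) else 9

-- A's cascade abstracted over its atomic tests
def pvCascade (b0 b1 b2 k3 k4 k5 k6 k7 e3 e4 e5 e6 e7 e8 : Bool) : String :=
  if b0 then "image" else if b1 then "video" else if b2 then "audio"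
  else if k3 || e3 then "pdf" else if k4 || e4 then "excel" else if k5 || e5 then "doc"
  else if k6 || e6 then "ppt" else if k7 || e7 then "text" else if e8 then "archive" else "other"

-- the literal extension table, as a nested conditional
theorem pvLookupRank_ext (e : String) : pvLookupRank pvExtRank e =
    if e = "pdf" then 3 else if e = "xls" then 4 else if e = "xlsx" then 4
    else if e = "doc" then 5 else if e = "docx" then 5 else if e = "ppt" then 6
    else if e = "pptx" then 6 else if e = "txt" then 7 else if e = "zip" then 8
    else if e = "rar" then 8 else if e = "7z" then 8 else if e = "tar" then 8
    else if e = "gz" then 8 else 9 := by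
  unfold pvLookupRank pvExtRank
  by_cases h1 : e = "pdf"
  · rw [List.find?_cons_of_pos (by simp [h1])]
    simp [h1]
  rw [List.find?_cons_of_neg (by simp only [beq_iff_eq]; exact fun h => h1 h.symm)]
  by_cases h2 : e = "xls"
  · rw [List.find?_cons_of_pos (by simp [h2])]
    simp [h2]
  rw [List.find?_cons_of_neg (by simp only [beq_iff_eq]; exact fun h => h2 h.symm)]
  by_cases h3 : e = "xlsx"
  · rw [List.find?_cons_of_pos (by simp [h3])]
    simp [h3]
  rw [List.find?_cons_of_neg (by simp only [beq_iff_eq]; exact fun h => h3 h.symm)]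
  by_cases h4 : e = "doc"
  · rw [List.find?_cons_of_pos (by simp [h4])]
    simp [h4]
  rw [List.find?_cons_of_neg (by simp only [beq_iff_eq]; exact fun h => h4 h.symm)]
  by_cases h5 : e = "docx"
  · rw [List.find?_cons_of_pos (by simp [h5])]
    simp [h5]
  rw [List.find?_cons_of_neg (by simp only [beq_iff_eq]; exact fun h => h5 h.symm)]
  by_cases h6 : e = "ppt"
  · rw [List.find?_cons_of_pos (by simp [h6])]
    simp [h6]
  rw [List.find?_cons_of_neg (by simp only [beq_iff_eq]; exact fun h => h6 h.symm)]
  by_cases h7 : e = "pptx"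
  · rw [List.find?_cons_of_pos (by simp [h7])]
    simp [h7]
  rw [List.find?_cons_of_neg (by simp only [beq_iff_eq]; exact fun h => h7 h.symm)]
  by_cases h8 : e = "txt"
  · rw [List.find?_cons_of_pos (by simp [h8])]
    simp [h8]
  rw [List.find?_cons_of_neg (by simp only [beq_iff_eq]; exact fun h => h8 h.symm)]
  by_cases h9 : e = "zip"
  · rw [List.find?_cons_of_pos (by simp [h9])]
    simp [h9]
  rw [List.find?_cons_of_neg (by simp only [beq_iff_eq]; exact fun h => h9 h.symm)]
  by_cases h10 : e = "rar"
  · rw [List.find?_cons_of_pos (by simp [h10])]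
    simp [h10]
  rw [List.find?_cons_of_neg (by simp only [beq_iff_eq]; exact fun h => h10 h.symm)]
  by_cases h11 : e = "7z"
  · rw [List.find?_cons_of_pos (by simp [h11])]
    simp [h11]
  rw [List.find?_cons_of_neg (by simp only [beq_iff_eq]; exact fun h => h11 h.symm)]
  by_cases h12 : e = "tar"
  · rw [List.find?_cons_of_pos (by simp [h12])]
    simp [h12]
  rw [List.find?_cons_of_neg (by simp only [beq_iff_eq]; exact fun h => h12 h.symm)]
  by_cases h13 : e = "gz"
  · rw [List.find?_cons_of_pos (by simp [h13])]
    simp [h13]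
  rw [List.find?_cons_of_neg (by simp only [beq_iff_eq]; exact fun h => h13 h.symm)]
  simp [List.find?_nil, h1, h2, h3, h4, h5, h6, h7, h8, h9, h10, h11, h12, h13]

-- suffix "e ++ ['.']" of the reversed name = the chars before the first '.' of the
-- reversed name are exactly e (for e free of dots)
theorem pvSuffixChar (R : List Char) : ∀ (E : List Char), ('.' : Char) ∉ E →
    ((E ++ ['.'] <+: R) ↔ ('.' ∈ R ∧ R.takeWhile (fun c => c != '.') = E)) := by
  induction R with
  | nil =>
    intro E _
    simp
  | cons a r ih =>
    intro E he
    cases E with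
    | nil =>
      by_cases ha : a = '.'
      · subst ha; simp [List.cons_prefix_cons, List.takeWhile_cons]
      · have ha' : ¬(('.' : Char) = a) := fun h => ha h.symm
        simp [List.cons_prefix_cons, List.takeWhile_cons, ha, ha']
    | cons b E' =>
      have hb : b ≠ '.' := fun h => he (h ▸ List.mem_cons_self)
      have he' : ('.' : Char) ∉ E' := fun h => he (List.mem_cons_of_mem _ h)
      have hb' : ¬(('.' : Char) = b) := fun h => hb h.symm
      by_cases hab : a = b
      · subst hab
        have ha' : ¬(('.' : Char) = a) := fun h => hb h.symm
        simp only [List.cons_append, List.cons_prefix_cons, List.takeWhile_cons,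
          List.mem_cons, ih E' he', bne_iff_ne, ne_eq, hb, not_false_eq_true, if_true,
          List.cons.injEq, true_and, ha', false_or]
        try tauto
      · by_cases ha : a = '.'
        · subst ha
          simp [List.cons_prefix_cons, List.takeWhile_cons, fun h : b = '.' => hb h]
        · simp [List.cons_prefix_cons, List.takeWhile_cons, ha, hab]
          exact fun h => absurd h.symm hab

-- A's n.endswith('.'+e) expressed through B's dot test and extension extraction
theorem pvEnds (n : String) (ext : List Char) (he : ('.' : Char) ∉ ext) :
    PySem.Str.endswith n (String.ofList ('.' :: ext)) =
      (PySem.Str.isIn "." n && (pvAfterLastDot n == String.ofList ext)) := by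
  rw [Bool.eq_iff_iff]
  simp only [PySem.Str.endswith_eq, Bool.and_eq_true, beq_iff_eq, String.toList_ofList]
  rw [PySem.Chars.endswith_iff, ← List.reverse_prefix]
  have he2 : ('.' : Char) ∉ ext.reverse := by simpa using he
  have h2 := pvSuffixChar (n.toList.reverse) (ext.reverse) he2
  simp only [List.reverse_cons] at h2 ⊢
  rw [h2]
  have hdot : (PySem.Str.isIn "." n = true) ↔ ('.' : Char) ∈ n.toList.reverse := by
    rw [PySem.Str.isIn_iff_infix]
    have : (("." : String)).toList = ['.'] := rfl
    rw [this, List.singleton_infix_iff, List.mem_reverse]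
  have hext : (n.toList.reverse.takeWhile (fun c => c != '.') = ext.reverse) ↔
      (pvAfterLastDot n = String.ofList ext) := by
    unfold pvAfterLastDot
    constructor
    · intro h; rw [h]; simp
    · intro h
      have := congrArg String.toList h
      simp only [String.toList_ofList] at this
      have := congrArg List.reverse this
      simpa using this
  rw [hdot, hext]

-- the six extension tests of A, through B's extension rank
theorem pvRank3 (e : String) : (pvLookupRank pvExtRank e = 3) ↔ (e = "pdf") := by
  rw [pvLookupRank_ext]
  by_cases h1 : e = "pdf"
  · rw [if_pos h1]
    simp [h1]
  rw [if_neg h1]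
  by_cases h2 : e = "xls"
  · rw [if_pos h2]
    simp [h2]
  rw [if_neg h2]
  by_cases h3 : e = "xlsx"
  · rw [if_pos h3]
    simp [h3]
  rw [if_neg h3]
  by_cases h4 : e = "doc"
  · rw [if_pos h4]
    simp [h4]
  rw [if_neg h4]
  by_cases h5 : e = "docx"
  · rw [if_pos h5]
    simp [h5]
  rw [if_neg h5]
  by_cases h6 : e = "ppt"
  · rw [if_pos h6]
    simp [h6]
  rw [if_neg h6]
  by_cases h7 : e = "pptx"
  · rw [if_pos h7]
    simp [h7]
  rw [if_neg h7]
  by_cases h8 : e = "txt"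
  · rw [if_pos h8]
    simp [h8]
  rw [if_neg h8]
  by_cases h9 : e = "zip"
  · rw [if_pos h9]
    simp [h9]
  rw [if_neg h9]
  by_cases h10 : e = "rar"
  · rw [if_pos h10]
    simp [h10]
  rw [if_neg h10]
  by_cases h11 : e = "7z"
  · rw [if_pos h11]
    simp [h11]
  rw [if_neg h11]
  by_cases h12 : e = "tar"
  · rw [if_pos h12]
    simp [h12]
  rw [if_neg h12]
  by_cases h13 : e = "gz"
  · rw [if_pos h13]
    simp [h13]
  rw [if_neg h13]
  simp [h1, h2, h3, h4, h5, h6, h7, h8, h9, h10, h11, h12, h13]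

theorem pvRank4 (e : String) : (pvLookupRank pvExtRank e = 4) ↔ (e = "xls" ∨ e = "xlsx") := by
  rw [pvLookupRank_ext]
  by_cases h1 : e = "pdf"
  · rw [if_pos h1]
    simp [h1]
  rw [if_neg h1]
  by_cases h2 : e = "xls"
  · rw [if_pos h2]
    simp [h2]
  rw [if_neg h2]
  by_cases h3 : e = "xlsx"
  · rw [if_pos h3]
    simp [h3]
  rw [if_neg h3]
  by_cases h4 : e = "doc"
  · rw [if_pos h4]
    simp [h4]
  rw [if_neg h4]
  by_cases h5 : e = "docx"
  · rw [if_pos h5]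
    simp [h5]
  rw [if_neg h5]
  by_cases h6 : e = "ppt"
  · rw [if_pos h6]
    simp [h6]
  rw [if_neg h6]
  by_cases h7 : e = "pptx"
  · rw [if_pos h7]
    simp [h7]
  rw [if_neg h7]
  by_cases h8 : e = "txt"
  · rw [if_pos h8]
    simp [h8]
  rw [if_neg h8]
  by_cases h9 : e = "zip"
  · rw [if_pos h9]
    simp [h9]
  rw [if_neg h9]
  by_cases h10 : e = "rar"
  · rw [if_pos h10]
    simp [h10]
  rw [if_neg h10]
  by_cases h11 : e = "7z"
  · rw [if_pos h11]
    simp [h11]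
  rw [if_neg h11]
  by_cases h12 : e = "tar"
  · rw [if_pos h12]
    simp [h12]
  rw [if_neg h12]
  by_cases h13 : e = "gz"
  · rw [if_pos h13]
    simp [h13]
  rw [if_neg h13]
  simp [h1, h2, h3, h4, h5, h6, h7, h8, h9, h10, h11, h12, h13]

theorem pvRank5 (e : String) : (pvLookupRank pvExtRank e = 5) ↔ (e = "doc" ∨ e = "docx") := by
  rw [pvLookupRank_ext]
  by_cases h1 : e = "pdf"
  · rw [if_pos h1]
    simp [h1]
  rw [if_neg h1]
  by_cases h2 : e = "xls"
  · rw [if_pos h2]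
    simp [h2]
  rw [if_neg h2]
  by_cases h3 : e = "xlsx"
  · rw [if_pos h3]
    simp [h3]
  rw [if_neg h3]
  by_cases h4 : e = "doc"
  · rw [if_pos h4]
    simp [h4]
  rw [if_neg h4]
  by_cases h5 : e = "docx"
  · rw [if_pos h5]
    simp [h5]
  rw [if_neg h5]
  by_cases h6 : e = "ppt"
  · rw [if_pos h6]
    simp [h6]
  rw [if_neg h6]
  by_cases h7 : e = "pptx"
  · rw [if_pos h7]
    simp [h7]
  rw [if_neg h7]
  by_cases h8 : e = "txt"
  · rw [if_pos h8]
    simp [h8]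
  rw [if_neg h8]
  by_cases h9 : e = "zip"
  · rw [if_pos h9]
    simp [h9]
  rw [if_neg h9]
  by_cases h10 : e = "rar"
  · rw [if_pos h10]
    simp [h10]
  rw [if_neg h10]
  by_cases h11 : e = "7z"
  · rw [if_pos h11]
    simp [h11]
  rw [if_neg h11]
  by_cases h12 : e = "tar"
  · rw [if_pos h12]
    simp [h12]
  rw [if_neg h12]
  by_cases h13 : e = "gz"
  · rw [if_pos h13]
    simp [h13]
  rw [if_neg h13]
  simp [h1, h2, h3, h4, h5, h6, h7, h8, h9, h10, h11, h12, h13]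

theorem pvRank6 (e : String) : (pvLookupRank pvExtRank e = 6) ↔ (e = "ppt" ∨ e = "pptx") := by
  rw [pvLookupRank_ext]
  by_cases h1 : e = "pdf"
  · rw [if_pos h1]
    simp [h1]
  rw [if_neg h1]
  by_cases h2 : e = "xls"
  · rw [if_pos h2]
    simp [h2]
  rw [if_neg h2]
  by_cases h3 : e = "xlsx"
  · rw [if_pos h3]
    simp [h3]
  rw [if_neg h3]
  by_cases h4 : e = "doc"
  · rw [if_pos h4]
    simp [h4]
  rw [if_neg h4]
  by_cases h5 : e = "docx"
  · rw [if_pos h5]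
    simp [h5]
  rw [if_neg h5]
  by_cases h6 : e = "ppt"
  · rw [if_pos h6]
    simp [h6]
  rw [if_neg h6]
  by_cases h7 : e = "pptx"
  · rw [if_pos h7]
    simp [h7]
  rw [if_neg h7]
  by_cases h8 : e = "txt"
  · rw [if_pos h8]
    simp [h8]
  rw [if_neg h8]
  by_cases h9 : e = "zip"
  · rw [if_pos h9]
    simp [h9]
  rw [if_neg h9]
  by_cases h10 : e = "rar"
  · rw [if_pos h10]
    simp [h10]
  rw [if_neg h10]
  by_cases h11 : e = "7z"
  · rw [if_pos h11]
    simp [h11]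
  rw [if_neg h11]
  by_cases h12 : e = "tar"
  · rw [if_pos h12]
    simp [h12]
  rw [if_neg h12]
  by_cases h13 : e = "gz"
  · rw [if_pos h13]
    simp [h13]
  rw [if_neg h13]
  simp [h1, h2, h3, h4, h5, h6, h7, h8, h9, h10, h11, h12, h13]

theorem pvRank7 (e : String) : (pvLookupRank pvExtRank e = 7) ↔ (e = "txt") := by
  rw [pvLookupRank_ext]
  by_cases h1 : e = "pdf"
  · rw [if_pos h1]
    simp [h1]
  rw [if_neg h1]
  by_cases h2 : e = "xls"
  · rw [if_pos h2]
    simp [h2]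
  rw [if_neg h2]
  by_cases h3 : e = "xlsx"
  · rw [if_pos h3]
    simp [h3]
  rw [if_neg h3]
  by_cases h4 : e = "doc"
  · rw [if_pos h4]
    simp [h4]
  rw [if_neg h4]
  by_cases h5 : e = "docx"
  · rw [if_pos h5]
    simp [h5]
  rw [if_neg h5]
  by_cases h6 : e = "ppt"
  · rw [if_pos h6]
    simp [h6]
  rw [if_neg h6]
  by_cases h7 : e = "pptx"
  · rw [if_pos h7]
    simp [h7]
  rw [if_neg h7]
  by_cases h8 : e = "txt"
  · rw [if_pos h8]
    simp [h8]
  rw [if_neg h8]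
  by_cases h9 : e = "zip"
  · rw [if_pos h9]
    simp [h9]
  rw [if_neg h9]
  by_cases h10 : e = "rar"
  · rw [if_pos h10]
    simp [h10]
  rw [if_neg h10]
  by_cases h11 : e = "7z"
  · rw [if_pos h11]
    simp [h11]
  rw [if_neg h11]
  by_cases h12 : e = "tar"
  · rw [if_pos h12]
    simp [h12]
  rw [if_neg h12]
  by_cases h13 : e = "gz"
  · rw [if_pos h13]
    simp [h13]
  rw [if_neg h13]
  simp [h1, h2, h3, h4, h5, h6, h7, h8, h9, h10, h11, h12, h13]

theorem pvRank8 (e : String) : (pvLookupRank pvExtRank e = 8) ↔ (e = "zip" ∨ e = "rar" ∨ e = "7z" ∨ e = "tar" ∨ e = "gz") := by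
  rw [pvLookupRank_ext]
  by_cases h1 : e = "pdf"
  · rw [if_pos h1]
    simp [h1]
  rw [if_neg h1]
  by_cases h2 : e = "xls"
  · rw [if_pos h2]
    simp [h2]
  rw [if_neg h2]
  by_cases h3 : e = "xlsx"
  · rw [if_pos h3]
    simp [h3]
  rw [if_neg h3]
  by_cases h4 : e = "doc"
  · rw [if_pos h4]
    simp [h4]
  rw [if_neg h4]
  by_cases h5 : e = "docx"
  · rw [if_pos h5]
    simp [h5]
  rw [if_neg h5]
  by_cases h6 : e = "ppt"
  · rw [if_pos h6]
    simp [h6]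
  rw [if_neg h6]
  by_cases h7 : e = "pptx"
  · rw [if_pos h7]
    simp [h7]
  rw [if_neg h7]
  by_cases h8 : e = "txt"
  · rw [if_pos h8]
    simp [h8]
  rw [if_neg h8]
  by_cases h9 : e = "zip"
  · rw [if_pos h9]
    simp [h9]
  rw [if_neg h9]
  by_cases h10 : e = "rar"
  · rw [if_pos h10]
    simp [h10]
  rw [if_neg h10]
  by_cases h11 : e = "7z"
  · rw [if_pos h11]
    simp [h11]
  rw [if_neg h11]
  by_cases h12 : e = "tar"
  · rw [if_pos h12]
    simp [h12]
  rw [if_neg h12]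
  by_cases h13 : e = "gz"
  · rw [if_pos h13]
    simp [h13]
  rw [if_neg h13]
  simp [h1, h2, h3, h4, h5, h6, h7, h8, h9, h10, h11, h12, h13]

theorem pvExt_pdf (n : String) :
    (pvErOf n == 3) = PySem.Str.endswith n ".pdf" := by
  rw [show (".pdf" : String) = String.ofList ('.' :: ['p', 'd', 'f']) from rfl,
    pvEnds n _ (by decide)]
  rw [Bool.eq_iff_iff]
  unfold pvErOf
  by_cases hd : PySem.Str.isIn "." n = true
  · rw [if_pos hd]
    simp only [hd, Bool.true_and, Bool.or_eq_true, beq_iff_eq, show String.ofList ['p', 'd', 'f'] = "pdf" from rfl]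
    exact pvRank3 _
  · rw [if_neg hd]
    simp only [Bool.not_eq_true] at hd
    simp only [hd, Bool.false_and, Bool.or_self, Bool.false_or]
    try decide

theorem pvExt_xls (n : String) :
    (pvErOf n == 4) = (PySem.Str.endswith n ".xls" || PySem.Str.endswith n ".xlsx") := by
  rw [show (".xls" : String) = String.ofList ('.' :: ['x', 'l', 's']) from rfl,
    show (".xlsx" : String) = String.ofList ('.' :: ['x', 'l', 's', 'x']) from rfl,
    pvEnds n _ (by decide), pvEnds n _ (by decide)]
  rw [Bool.eq_iff_iff]
  unfold pvErOf
  by_cases hd : PySem.Str.isIn "." n = true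
  · rw [if_pos hd]
    simp only [hd, Bool.true_and, Bool.or_eq_true, beq_iff_eq, show String.ofList ['x', 'l', 's'] = "xls" from rfl, show String.ofList ['x', 'l', 's', 'x'] = "xlsx" from rfl]
    exact pvRank4 _
  · rw [if_neg hd]
    simp only [Bool.not_eq_true] at hd
    simp only [hd, Bool.false_and, Bool.or_self, Bool.false_or]
    try decide

theorem pvExt_doc (n : String) :
    (pvErOf n == 5) = (PySem.Str.endswith n ".doc" || PySem.Str.endswith n ".docx") := by
  rw [show (".doc" : String) = String.ofList ('.' :: ['d', 'o', 'c']) from rfl,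
    show (".docx" : String) = String.ofList ('.' :: ['d', 'o', 'c', 'x']) from rfl,
    pvEnds n _ (by decide), pvEnds n _ (by decide)]
  rw [Bool.eq_iff_iff]
  unfold pvErOf
  by_cases hd : PySem.Str.isIn "." n = true
  · rw [if_pos hd]
    simp only [hd, Bool.true_and, Bool.or_eq_true, beq_iff_eq, show String.ofList ['d', 'o', 'c'] = "doc" from rfl, show String.ofList ['d', 'o', 'c', 'x'] = "docx" from rfl]
    exact pvRank5 _
  · rw [if_neg hd]
    simp only [Bool.not_eq_true] at hd
    simp only [hd, Bool.false_and, Bool.or_self, Bool.false_or]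
    try decide

theorem pvExt_ppt (n : String) :
    (pvErOf n == 6) = (PySem.Str.endswith n ".ppt" || PySem.Str.endswith n ".pptx") := by
  rw [show (".ppt" : String) = String.ofList ('.' :: ['p', 'p', 't']) from rfl,
    show (".pptx" : String) = String.ofList ('.' :: ['p', 'p', 't', 'x']) from rfl,
    pvEnds n _ (by decide), pvEnds n _ (by decide)]
  rw [Bool.eq_iff_iff]
  unfold pvErOf
  by_cases hd : PySem.Str.isIn "." n = true
  · rw [if_pos hd]
    simp only [hd, Bool.true_and, Bool.or_eq_true, beq_iff_eq, show String.ofList ['p', 'p', 't'] = "ppt" from rfl, show String.ofList ['p', 'p', 't', 'x'] = "pptx" from rfl]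
    exact pvRank6 _
  · rw [if_neg hd]
    simp only [Bool.not_eq_true] at hd
    simp only [hd, Bool.false_and, Bool.or_self, Bool.false_or]
    try decide

theorem pvExt_txt (n : String) :
    (pvErOf n == 7) = PySem.Str.endswith n ".txt" := by
  rw [show (".txt" : String) = String.ofList ('.' :: ['t', 'x', 't']) from rfl,
    pvEnds n _ (by decide)]
  rw [Bool.eq_iff_iff]
  unfold pvErOf
  by_cases hd : PySem.Str.isIn "." n = true
  · rw [if_pos hd]
    simp only [hd, Bool.true_and, Bool.or_eq_true, beq_iff_eq, show String.ofList ['t', 'x', 't'] = "txt" from rfl]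
    exact pvRank7 _
  · rw [if_neg hd]
    simp only [Bool.not_eq_true] at hd
    simp only [hd, Bool.false_and, Bool.or_self, Bool.false_or]
    try decide

theorem pvExt_arch (n : String) :
    (pvErOf n == 8) = (PySem.Str.endswith n ".zip" || PySem.Str.endswith n ".rar" ||
      PySem.Str.endswith n ".7z" || PySem.Str.endswith n ".tar" || PySem.Str.endswith n ".gz") := by
  rw [show (".zip" : String) = String.ofList ('.' :: ['z', 'i', 'p']) from rfl,
    show (".rar" : String) = String.ofList ('.' :: ['r', 'a', 'r']) from rfl,
    show (".7z" : String) = String.ofList ('.' :: ['7', 'z']) from rfl,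
    show (".tar" : String) = String.ofList ('.' :: ['t', 'a', 'r']) from rfl,
    show (".gz" : String) = String.ofList ('.' :: ['g', 'z']) from rfl,
    pvEnds n _ (by decide), pvEnds n _ (by decide), pvEnds n _ (by decide), pvEnds n _ (by decide), pvEnds n _ (by decide)]
  rw [Bool.eq_iff_iff]
  unfold pvErOf
  by_cases hd : PySem.Str.isIn "." n = true
  · rw [if_pos hd]
    simp only [hd, Bool.true_and, Bool.or_eq_true, beq_iff_eq, show String.ofList ['z', 'i', 'p'] = "zip" from rfl, show String.ofList ['r', 'a', 'r'] = "rar" from rfl, show String.ofList ['7', 'z'] = "7z" from rfl, show String.ofList ['t', 'a', 'r'] = "tar" from rfl, show String.ofList ['g', 'z'] = "gz" from rfl]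
    simp only [or_assoc]
    exact pvRank8 _
  · rw [if_neg hd]
    simp only [Bool.not_eq_true] at hd
    simp only [hd, Bool.false_and, Bool.or_self, Bool.false_or]
    try decide

-- bounds for the extension-table lookup
theorem pvLookup_ge3 (e : String) : 3 ≤ pvLookupRank pvExtRank e := by
  rw [pvLookupRank_ext]
  by_cases h1 : e = "pdf"
  · rw [if_pos h1]
    try omega
  rw [if_neg h1]
  by_cases h2 : e = "xls"
  · rw [if_pos h2]
    omega
  rw [if_neg h2]
  by_cases h3 : e = "xlsx"
  · rw [if_pos h3]
    omega
  rw [if_neg h3]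
  by_cases h4 : e = "doc"
  · rw [if_pos h4]
    omega
  rw [if_neg h4]
  by_cases h5 : e = "docx"
  · rw [if_pos h5]
    omega
  rw [if_neg h5]
  by_cases h6 : e = "ppt"
  · rw [if_pos h6]
    omega
  rw [if_neg h6]
  by_cases h7 : e = "pptx"
  · rw [if_pos h7]
    omega
  rw [if_neg h7]
  by_cases h8 : e = "txt"
  · rw [if_pos h8]
    omega
  rw [if_neg h8]
  by_cases h9 : e = "zip"
  · rw [if_pos h9]
    omega
  rw [if_neg h9]
  by_cases h10 : e = "rar"
  · rw [if_pos h10]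
    omega
  rw [if_neg h10]
  by_cases h11 : e = "7z"
  · rw [if_pos h11]
    omega
  rw [if_neg h11]
  by_cases h12 : e = "tar"
  · rw [if_pos h12]
    omega
  rw [if_neg h12]
  by_cases h13 : e = "gz"
  · rw [if_pos h13]
    omega
  rw [if_neg h13]
  try omega

theorem pvLookup_le9 (e : String) : pvLookupRank pvExtRank e ≤ 9 := by
  rw [pvLookupRank_ext]
  by_cases h1 : e = "pdf"
  · rw [if_pos h1]
    omega
  rw [if_neg h1]
  by_cases h2 : e = "xls"
  · rw [if_pos h2]
    omega
  rw [if_neg h2]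
  by_cases h3 : e = "xlsx"
  · rw [if_pos h3]
    omega
  rw [if_neg h3]
  by_cases h4 : e = "doc"
  · rw [if_pos h4]
    omega
  rw [if_neg h4]
  by_cases h5 : e = "docx"
  · rw [if_pos h5]
    omega
  rw [if_neg h5]
  by_cases h6 : e = "ppt"
  · rw [if_pos h6]
    omega
  rw [if_neg h6]
  by_cases h7 : e = "pptx"
  · rw [if_pos h7]
    omega
  rw [if_neg h7]
  by_cases h8 : e = "txt"
  · rw [if_pos h8]
    omega
  rw [if_neg h8]
  by_cases h9 : e = "zip"
  · rw [if_pos h9]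
    omega
  rw [if_neg h9]
  by_cases h10 : e = "rar"
  · rw [if_pos h10]
    omega
  rw [if_neg h10]
  by_cases h11 : e = "7z"
  · rw [if_pos h11]
    omega
  rw [if_neg h11]
  by_cases h12 : e = "tar"
  · rw [if_pos h12]
    omega
  rw [if_neg h12]
  by_cases h13 : e = "gz"
  · rw [if_pos h13]
    omega
  rw [if_neg h13]
  try omega

-- the running-minimum step over one (condition, rank) table entry
def pvAcc (a : Nat) (p : Bool × Nat) : Nat := if p.1 then min a p.2 else a

theorem pvAcc_zero (l : List (Bool × Nat)) : l.foldl pvAcc 0 = 0 := by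
  induction l with
  | nil => rfl
  | cons p t ih =>
    have h : pvAcc 0 p = 0 := by unfold pvAcc; split <;> simp
    rw [List.foldl_cons, h, ih]

theorem pvAcc_const (c : Nat) (l : List (Bool × Nat))
    (h : l.all (fun p => decide (c ≤ p.2)) = true) : l.foldl pvAcc c = c := by
  induction l with
  | nil => rfl
  | cons p t ih =>
    rw [List.all_cons, Bool.and_eq_true] at h
    have hp : pvAcc c p = c := by
      unfold pvAcc; split
      · exact Nat.min_eq_left (of_decide_eq_true h.1)
      · rfl
    rw [List.foldl_cons, hp]
    exact ih h.2

theorem pvAcc_ge (c : Nat) (l : List (Bool × Nat)) :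
    ∀ a, c ≤ a → l.all (fun p => decide (c ≤ p.2)) = true → c ≤ l.foldl pvAcc a := by
  induction l with
  | nil => intro a ha _; simpa using ha
  | cons p t ih =>
    intro a ha h
    rw [List.all_cons, Bool.and_eq_true] at h
    rw [List.foldl_cons]
    refine ih _ ?_ h.2
    unfold pvAcc; split
    · exact le_min ha (of_decide_eq_true h.1)
    · exact ha

theorem pvAcc_le (l : List (Bool × Nat)) : ∀ a, l.foldl pvAcc a ≤ a := by
  induction l with
  | nil => intro a; simp
  | cons p t ih =>
    intro a
    rw [List.foldl_cons]
    refine le_trans (ih _) ?_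
    unfold pvAcc; split
    · exact Nat.min_le_left _ _
    · exact le_rfl

-- a string-keyed conditional table is the Bool-keyed one after evaluating the conditions
theorem pvFilterMapMap {α : Type} (q : α → Bool) (v : α → Nat) (tbl : List α) :
    tbl.filterMap (fun pr => if q pr then some (v pr) else none) =
      (tbl.map (fun pr => (q pr, v pr))).filterMap (fun pr => if pr.1 then some pr.2 else none) := by
  induction tbl with
  | nil => rfl
  | cons p t ih =>
    rw [List.filterMap_cons, List.map_cons, List.filterMap_cons]
    cases hp : q p <;> simpa using ih

-- the min-fold over the ranks a conditional table contributes
theorem pvFoldlMinFilterMap (tbl : List (Bool × Nat)) :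
    ∀ a, (tbl.filterMap (fun pr => if pr.1 then some pr.2 else none)).foldl min a =
      tbl.foldl pvAcc a := by
  induction tbl with
  | nil => intro a; rfl
  | cons p t ih =>
    intro a
    cases hp : p.1 <;>
      simp [List.filterMap_cons, hp, pvAcc, List.foldl_cons, ih]

-- core fact: the minimum of the contributed ranks selects the cascade's label
theorem pvMain (b0 b1 b2 k3 k4a k4b k5a k5b k6a k6b k7 : Bool) (er : Nat)
    (h3 : 3 ≤ er) (h9 : er ≤ 9) :
    (if min (List.foldl pvAcc 9 [(b0, 0), (b1, 1), (b2, 2), (k3, 3), (k4a, 4), (k4b, 4),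
        (k5a, 5), (k5b, 5), (k6a, 6), (k6b, 6), (k7, 7)]) er < 9
      then pvLabels.getD (min (List.foldl pvAcc 9 [(b0, 0), (b1, 1), (b2, 2), (k3, 3), (k4a, 4),
        (k4b, 4), (k5a, 5), (k5b, 5), (k6a, 6), (k6b, 6), (k7, 7)]) er) "other"
      else "other") =
    pvCascade b0 b1 b2 k3 (k4a || k4b) (k5a || k5b) (k6a || k6b) k7
      (er == 3) (er == 4) (er == 5) (er == 6) (er == 7) (er == 8) := by
  cases b0 with
  | true =>
    have hM : List.foldl pvAcc 9 [(true, 0), (b1, 1), (b2, 2), (k3, 3), (k4a, 4), (k4b, 4),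
        (k5a, 5), (k5b, 5), (k6a, 6), (k6b, 6), (k7, 7)] = 0 := by
      have h0 : List.foldl pvAcc 9 [(true, 0), (b1, 1), (b2, 2), (k3, 3), (k4a, 4), (k4b, 4),
          (k5a, 5), (k5b, 5), (k6a, 6), (k6b, 6), (k7, 7)] =
        List.foldl pvAcc 0 [(b1, 1), (b2, 2), (k3, 3), (k4a, 4), (k4b, 4),
          (k5a, 5), (k5b, 5), (k6a, 6), (k6b, 6), (k7, 7)] := rfl
      rw [h0, pvAcc_zero]
    rw [hM, Nat.min_eq_left (by omega)]
    simp [pvCascade, pvLabels]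
  | false =>
  cases b1 with
  | true =>
    have hM : List.foldl pvAcc 9 [(false, 0), (true, 1), (b2, 2), (k3, 3), (k4a, 4), (k4b, 4),
        (k5a, 5), (k5b, 5), (k6a, 6), (k6b, 6), (k7, 7)] = 1 := by
      have h0 : List.foldl pvAcc 9 [(false, 0), (true, 1), (b2, 2), (k3, 3), (k4a, 4), (k4b, 4),
          (k5a, 5), (k5b, 5), (k6a, 6), (k6b, 6), (k7, 7)] =
        List.foldl pvAcc 1 [(b2, 2), (k3, 3), (k4a, 4), (k4b, 4),
          (k5a, 5), (k5b, 5), (k6a, 6), (k6b, 6), (k7, 7)] := rfl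
      rw [h0]; exact pvAcc_const 1 _ rfl
    rw [hM, Nat.min_eq_left (by omega)]
    simp [pvCascade, pvLabels]
  | false =>
  cases b2 with
  | true =>
    have hM : List.foldl pvAcc 9 [(false, 0), (false, 1), (true, 2), (k3, 3), (k4a, 4), (k4b, 4),
        (k5a, 5), (k5b, 5), (k6a, 6), (k6b, 6), (k7, 7)] = 2 := by
      have h0 : List.foldl pvAcc 9 [(false, 0), (false, 1), (true, 2), (k3, 3), (k4a, 4), (k4b, 4),
          (k5a, 5), (k5b, 5), (k6a, 6), (k6b, 6), (k7, 7)] =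
        List.foldl pvAcc 2 [(k3, 3), (k4a, 4), (k4b, 4),
          (k5a, 5), (k5b, 5), (k6a, 6), (k6b, 6), (k7, 7)] := rfl
      rw [h0]; exact pvAcc_const 2 _ rfl
    rw [hM, Nat.min_eq_left (by omega)]
    simp [pvCascade, pvLabels]
  | false =>
  cases k3 with
  | true =>
    have hM : List.foldl pvAcc 9 [(false, 0), (false, 1), (false, 2), (true, 3), (k4a, 4), (k4b, 4),
        (k5a, 5), (k5b, 5), (k6a, 6), (k6b, 6), (k7, 7)] = 3 := by
      have h0 : List.foldl pvAcc 9 [(false, 0), (false, 1), (false, 2), (true, 3), (k4a, 4),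
          (k4b, 4), (k5a, 5), (k5b, 5), (k6a, 6), (k6b, 6), (k7, 7)] =
        List.foldl pvAcc 3 [(k4a, 4), (k4b, 4),
          (k5a, 5), (k5b, 5), (k6a, 6), (k6b, 6), (k7, 7)] := rfl
      rw [h0]; exact pvAcc_const 3 _ rfl
    rw [hM, Nat.min_eq_left (by omega)]
    simp [pvCascade, pvLabels]
  | false =>
  by_cases he3 : er = 3
  · subst he3
    have hM : 4 ≤ List.foldl pvAcc 9 [(false, 0), (false, 1), (false, 2), (false, 3), (k4a, 4),
        (k4b, 4), (k5a, 5), (k5b, 5), (k6a, 6), (k6b, 6), (k7, 7)] := by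
      have h0 : List.foldl pvAcc 9 [(false, 0), (false, 1), (false, 2), (false, 3), (k4a, 4),
          (k4b, 4), (k5a, 5), (k5b, 5), (k6a, 6), (k6b, 6), (k7, 7)] =
        List.foldl pvAcc 9 [(k4a, 4), (k4b, 4),
          (k5a, 5), (k5b, 5), (k6a, 6), (k6b, 6), (k7, 7)] := rfl
      rw [h0]; exact pvAcc_ge 4 _ 9 (by omega) rfl
    rw [Nat.min_eq_right (by omega)]
    simp [pvCascade, pvLabels]
  cases k4a with
  | true =>
    have hM : List.foldl pvAcc 9 [(false, 0), (false, 1), (false, 2), (false, 3), (true, 4),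
        (k4b, 4), (k5a, 5), (k5b, 5), (k6a, 6), (k6b, 6), (k7, 7)] = 4 := by
      have h0 : List.foldl pvAcc 9 [(false, 0), (false, 1), (false, 2), (false, 3), (true, 4),
          (k4b, 4), (k5a, 5), (k5b, 5), (k6a, 6), (k6b, 6), (k7, 7)] =
        List.foldl pvAcc 4 [(k4b, 4), (k5a, 5), (k5b, 5), (k6a, 6), (k6b, 6), (k7, 7)] := rfl
      rw [h0]; exact pvAcc_const 4 _ rfl
    rw [hM, Nat.min_eq_left (by omega)]
    simp [pvCascade, pvLabels, he3]
  | false =>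
  cases k4b with
  | true =>
    have hM : List.foldl pvAcc 9 [(false, 0), (false, 1), (false, 2), (false, 3), (false, 4),
        (true, 4), (k5a, 5), (k5b, 5), (k6a, 6), (k6b, 6), (k7, 7)] = 4 := by
      have h0 : List.foldl pvAcc 9 [(false, 0), (false, 1), (false, 2), (false, 3), (false, 4),
          (true, 4), (k5a, 5), (k5b, 5), (k6a, 6), (k6b, 6), (k7, 7)] =
        List.foldl pvAcc 4 [(k5a, 5), (k5b, 5), (k6a, 6), (k6b, 6), (k7, 7)] := rfl
      rw [h0]; exact pvAcc_const 4 _ rfl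
    rw [hM, Nat.min_eq_left (by omega)]
    simp [pvCascade, pvLabels, he3]
  | false =>
  by_cases he4 : er = 4
  · subst he4
    have hM : 5 ≤ List.foldl pvAcc 9 [(false, 0), (false, 1), (false, 2), (false, 3), (false, 4),
        (false, 4), (k5a, 5), (k5b, 5), (k6a, 6), (k6b, 6), (k7, 7)] := by
      have h0 : List.foldl pvAcc 9 [(false, 0), (false, 1), (false, 2), (false, 3), (false, 4),
          (false, 4), (k5a, 5), (k5b, 5), (k6a, 6), (k6b, 6), (k7, 7)] =
        List.foldl pvAcc 9 [(k5a, 5), (k5b, 5), (k6a, 6), (k6b, 6), (k7, 7)] := rfl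
      rw [h0]; exact pvAcc_ge 5 _ 9 (by omega) rfl
    rw [Nat.min_eq_right (by omega)]
    simp [pvCascade, pvLabels]
  cases k5a with
  | true =>
    have hM : List.foldl pvAcc 9 [(false, 0), (false, 1), (false, 2), (false, 3), (false, 4),
        (false, 4), (true, 5), (k5b, 5), (k6a, 6), (k6b, 6), (k7, 7)] = 5 := by
      have h0 : List.foldl pvAcc 9 [(false, 0), (false, 1), (false, 2), (false, 3), (false, 4),
          (false, 4), (true, 5), (k5b, 5), (k6a, 6), (k6b, 6), (k7, 7)] =
        List.foldl pvAcc 5 [(k5b, 5), (k6a, 6), (k6b, 6), (k7, 7)] := rfl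
      rw [h0]; exact pvAcc_const 5 _ rfl
    rw [hM, Nat.min_eq_left (by omega)]
    simp [pvCascade, pvLabels, he3, he4]
  | false =>
  cases k5b with
  | true =>
    have hM : List.foldl pvAcc 9 [(false, 0), (false, 1), (false, 2), (false, 3), (false, 4),
        (false, 4), (false, 5), (true, 5), (k6a, 6), (k6b, 6), (k7, 7)] = 5 := by
      have h0 : List.foldl pvAcc 9 [(false, 0), (false, 1), (false, 2), (false, 3), (false, 4),
          (false, 4), (false, 5), (true, 5), (k6a, 6), (k6b, 6), (k7, 7)] =
        List.foldl pvAcc 5 [(k6a, 6), (k6b, 6), (k7, 7)] := rfl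
      rw [h0]; exact pvAcc_const 5 _ rfl
    rw [hM, Nat.min_eq_left (by omega)]
    simp [pvCascade, pvLabels, he3, he4]
  | false =>
  by_cases he5 : er = 5
  · subst he5
    have hM : 6 ≤ List.foldl pvAcc 9 [(false, 0), (false, 1), (false, 2), (false, 3), (false, 4),
        (false, 4), (false, 5), (false, 5), (k6a, 6), (k6b, 6), (k7, 7)] := by
      have h0 : List.foldl pvAcc 9 [(false, 0), (false, 1), (false, 2), (false, 3), (false, 4),
          (false, 4), (false, 5), (false, 5), (k6a, 6), (k6b, 6), (k7, 7)] =
        List.foldl pvAcc 9 [(k6a, 6), (k6b, 6), (k7, 7)] := rfl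
      rw [h0]; exact pvAcc_ge 6 _ 9 (by omega) rfl
    rw [Nat.min_eq_right (by omega)]
    simp [pvCascade, pvLabels]
  cases k6a with
  | true =>
    have hM : List.foldl pvAcc 9 [(false, 0), (false, 1), (false, 2), (false, 3), (false, 4),
        (false, 4), (false, 5), (false, 5), (true, 6), (k6b, 6), (k7, 7)] = 6 := by
      have h0 : List.foldl pvAcc 9 [(false, 0), (false, 1), (false, 2), (false, 3), (false, 4),
          (false, 4), (false, 5), (false, 5), (true, 6), (k6b, 6), (k7, 7)] =
        List.foldl pvAcc 6 [(k6b, 6), (k7, 7)] := rfl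
      rw [h0]; exact pvAcc_const 6 _ rfl
    rw [hM, Nat.min_eq_left (by omega)]
    simp [pvCascade, pvLabels, he3, he4, he5]
  | false =>
  cases k6b with
  | true =>
    have hM : List.foldl pvAcc 9 [(false, 0), (false, 1), (false, 2), (false, 3), (false, 4),
        (false, 4), (false, 5), (false, 5), (false, 6), (true, 6), (k7, 7)] = 6 := by
      have h0 : List.foldl pvAcc 9 [(false, 0), (false, 1), (false, 2), (false, 3), (false, 4),
          (false, 4), (false, 5), (false, 5), (false, 6), (true, 6), (k7, 7)] =
        List.foldl pvAcc 6 [(k7, 7)] := rfl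
      rw [h0]; exact pvAcc_const 6 _ rfl
    rw [hM, Nat.min_eq_left (by omega)]
    simp [pvCascade, pvLabels, he3, he4, he5]
  | false =>
  by_cases he6 : er = 6
  · subst he6
    have hM : 7 ≤ List.foldl pvAcc 9 [(false, 0), (false, 1), (false, 2), (false, 3), (false, 4),
        (false, 4), (false, 5), (false, 5), (false, 6), (false, 6), (k7, 7)] := by
      have h0 : List.foldl pvAcc 9 [(false, 0), (false, 1), (false, 2), (false, 3), (false, 4),
          (false, 4), (false, 5), (false, 5), (false, 6), (false, 6), (k7, 7)] =
        List.foldl pvAcc 9 [(k7, 7)] := rfl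
      rw [h0]; exact pvAcc_ge 7 _ 9 (by omega) rfl
    rw [Nat.min_eq_right (by omega)]
    simp [pvCascade, pvLabels]
  cases k7 with
  | true =>
    have hM : List.foldl pvAcc 9 [(false, 0), (false, 1), (false, 2), (false, 3), (false, 4),
        (false, 4), (false, 5), (false, 5), (false, 6), (false, 6), (true, 7)] = 7 := rfl
    rw [hM, Nat.min_eq_left (by omega)]
    simp [pvCascade, pvLabels, he3, he4, he5, he6]
  | false =>
  have hM : List.foldl pvAcc 9 [(false, 0), (false, 1), (false, 2), (false, 3), (false, 4),
      (false, 4), (false, 5), (false, 5), (false, 6), (false, 6), (false, 7)] = 9 := rfl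
  rw [hM]
  by_cases he7 : er = 7
  · subst he7
    rw [Nat.min_eq_right (by omega)]
    simp [pvCascade, pvLabels]
  by_cases he8 : er = 8
  · subst he8
    rw [Nat.min_eq_right (by omega)]
    simp [pvCascade, pvLabels, he3, he4, he5, he6, he7]
  have he9 : er = 9 := by omega
  subst he9
  rw [Nat.min_eq_left (by omega)]
  simp [pvCascade, pvLabels, he3, he4, he5, he6, he7, he8]

-- pvMain specialised to the no-extension case (no rank contributed by the name)
theorem pvMainNoExt (b0 b1 b2 k3 k4a k4b k5a k5b k6a k6b k7 : Bool) :
    (if List.foldl pvAcc 9 [(b0, 0), (b1, 1), (b2, 2), (k3, 3), (k4a, 4), (k4b, 4),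
        (k5a, 5), (k5b, 5), (k6a, 6), (k6b, 6), (k7, 7)] < 9
      then pvLabels.getD (List.foldl pvAcc 9 [(b0, 0), (b1, 1), (b2, 2), (k3, 3), (k4a, 4),
        (k4b, 4), (k5a, 5), (k5b, 5), (k6a, 6), (k6b, 6), (k7, 7)]) "other"
      else "other") =
    pvCascade b0 b1 b2 k3 (k4a || k4b) (k5a || k5b) (k6a || k6b) k7
      false false false false false false := by
  have h := pvMain b0 b1 b2 k3 k4a k4b k5a k5b k6a k6b k7 9 (by omega) (by omega)
  rw [Nat.min_eq_left (pvAcc_le _ 9)] at h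
  simpa using h

-- per-element agreement: B's minimum-rank label equals A's cascade label
set_option maxHeartbeats 800000 in
theorem pvLabel_eq (m n : String) :
    (let ranks : List Nat :=
        [9]
        ++ pvMimePrefixes.filterMap (fun pr => if PySem.Str.startswith m pr.1 then some pr.2 else none)
        ++ pvMimeKeywords.filterMap (fun kr => if PySem.Str.isIn kr.1 m then some kr.2 else none)
        ++ (if PySem.Str.isIn "." n then [pvLookupRank pvExtRank (pvAfterLastDot n)] else [])
      let r := (PySem.List.min? ranks (fun x => x)).getD 9
      if r < 9 then pvLabels.getD r "other" else "other") =
    pvCascade (PySem.Str.startswith m "image/") (PySem.Str.startswith m "video/")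
      (PySem.Str.startswith m "audio/") (PySem.Str.isIn "pdf" m)
      (PySem.Str.isIn "sheet" m || PySem.Str.isIn "excel" m)
      (PySem.Str.isIn "word" m || PySem.Str.isIn "document" m)
      (PySem.Str.isIn "presentation" m || PySem.Str.isIn "powerpoint" m)
      (PySem.Str.isIn "text" m)
      (pvErOf n == 3) (pvErOf n == 4) (pvErOf n == 5) (pvErOf n == 6) (pvErOf n == 7)
      (pvErOf n == 8) := by
  by_cases hd : PySem.Str.isIn "." n
  · simp only [pvMimePrefixes, pvMimeKeywords, pvErOf, hd, if_true, List.cons_append,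
      List.nil_append, PySem.List.min?_id_cons, Option.getD_some, List.foldl_append,
      List.foldl_cons, List.foldl_nil]
    rw [pvFilterMapMap (fun pr : String × Nat => PySem.Str.startswith m pr.1) (fun pr => pr.2),
      pvFilterMapMap (fun pr : String × Nat => PySem.Str.isIn pr.1 m) (fun pr => pr.2)]
    simp only [List.map_cons, List.map_nil]
    rw [pvFoldlMinFilterMap, pvFoldlMinFilterMap]
    rw [show ∀ (P K : List (Bool × Nat)), List.foldl pvAcc (List.foldl pvAcc 9 P) K =
        List.foldl pvAcc 9 (P ++ K) from fun P K => (List.foldl_append).symm]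
    simp only [List.cons_append, List.nil_append]
    exact pvMain _ _ _ _ _ _ _ _ _ _ _ _ (pvLookup_ge3 _) (pvLookup_le9 _)
  · simp only [Bool.not_eq_true] at hd
    simp only [pvMimePrefixes, pvMimeKeywords, pvErOf, hd, Bool.false_eq_true, if_false,
      List.append_nil, List.cons_append, List.nil_append, PySem.List.min?_id_cons,
      Option.getD_some, List.foldl_append, List.foldl_nil]
    rw [pvFilterMapMap (fun pr : String × Nat => PySem.Str.startswith m pr.1) (fun pr => pr.2),
      pvFilterMapMap (fun pr : String × Nat => PySem.Str.isIn pr.1 m) (fun pr => pr.2)]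
    simp only [List.map_cons, List.map_nil]
    rw [pvFoldlMinFilterMap, pvFoldlMinFilterMap]
    rw [show ∀ (P K : List (Bool × Nat)), List.foldl pvAcc (List.foldl pvAcc 9 P) K =
        List.foldl pvAcc 9 (P ++ K) from fun P K => (List.foldl_append).symm]
    simp only [List.cons_append, List.nil_append]
    exact pvMainNoExt _ _ _ _ _ _ _ _ _ _ _

-- ===== VERDICT (by name: the statement is the Claim_ definition above) =====
theorem annotate_files_spec : Claim_equal_annotate_files := by
  intro files _
  unfold Spec_annotate_files annotate_files annotate_files_alt
  refine (List.map_congr_left (fun f _ => ?_)).symm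
  have h := pvLabel_eq (pvDictGet f "mimeType" "") (PySem.Str.lower (pvDictGet f "name" ""))
  simp only at h ⊢
  rw [h, pvExt_pdf, pvExt_xls, pvExt_doc, pvExt_ppt, pvExt_txt, pvExt_arch]
  simp [pvCascade, or_assoc]
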